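-- pv_equiv track=rewrite | github.com/MohammadAqaNoori/SentinelX-AI_Final_project | Defince.py | _assign_interceptors_csp
-- ===== SOURCE A (Python) =====
-- def _assign_interceptors_csp(threats, available_slots):
--     assignment = {}
--     def is_consistent(assignment):
--         count = sum(1 for v in assignment.values() if v == 'target')
--         return count <= available_slots
--     def backtrack(var_index):
--         if var_index == len(threats):
--             return assignment.copy()  # Return a copy of the valid assignment
--         variable = threats[var_index]
--         for value in ['target', 'not_target']:  # Prefer 'target' first to maximize interceptions
--             assignment[variable] = value
--             if is_consistent(assignment):
--                 result = backtrack(var_index + 1)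
--                 if result:
--                     return result
--             del assignment[variable]
--         return None
--     result = backtrack(0)
--     if result:
--         return [threat for threat in threats if result.get(threat) == 'target']
--     return []
-- ===== SOURCE B (Python) =====
-- def _assign_interceptors_csp(threats, available_slots):
--     targets = set()
--     seen = set()
--     for t in threats:
--         if t not in seen:
--             seen.add(t)
--             if len(targets) < available_slots:
--                 targets.add(t)
--     return [t for t in threats if t in targets]
-- ===== Notes on version B (the rewrite author's own statement) =====
-- stated objective: faster
-- what changed: Replaces the recursive dict-based CSP backtracking, whose consistency check rescans all assigned values at every step, with a single forward pass over the threats maintaining a seen-set and a target-set, followed by one filter.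
import Mathlib
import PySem

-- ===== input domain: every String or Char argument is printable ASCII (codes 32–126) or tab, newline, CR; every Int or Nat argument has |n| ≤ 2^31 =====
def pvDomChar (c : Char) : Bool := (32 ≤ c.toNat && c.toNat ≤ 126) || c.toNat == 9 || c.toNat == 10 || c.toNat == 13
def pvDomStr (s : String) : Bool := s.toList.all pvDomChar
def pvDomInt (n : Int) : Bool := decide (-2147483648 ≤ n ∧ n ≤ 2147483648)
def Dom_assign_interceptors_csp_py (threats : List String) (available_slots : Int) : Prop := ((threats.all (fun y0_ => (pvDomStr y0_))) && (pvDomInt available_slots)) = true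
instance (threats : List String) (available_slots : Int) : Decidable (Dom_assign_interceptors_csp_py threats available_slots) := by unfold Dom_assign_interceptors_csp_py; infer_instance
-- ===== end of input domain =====

-- B replaces A's recursive dict-based backtracking (which rescans all assigned values at
-- every step) with a single forward pass over the threats (seen-set + target-set), then one filter.


-- ===== PORT A =====
-- is_consistent: count = sum(1 for v in assignment.values() if v == 'target'); count <= available_slots
def pvIsConsistent (available_slots : Int) (assignment : PySem.Dict String String) : Bool :=
  decide ((((assignment.values.filter (fun v => v == "target")).length : Int)) ≤ available_slots)

-- backtrack(var_index): the mutable shared dict is threaded in and out (second component =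
-- the dict's state on return, so deeper deletions are visible to the caller, as in Python);
-- the for-loop over ['target', 'not_target'] is unrolled into its two iterations.
def pvBacktrack (available_slots : Int) :
    List String → PySem.Dict String String →
    Option (PySem.Dict String String) × PySem.Dict String String
  | [], assignment => (some assignment, assignment)          -- return assignment.copy()
  | var :: rest, assignment =>
    -- value = 'target'
    let a1 := assignment.insert var "target"
    match (if pvIsConsistent available_slots a1 then pvBacktrack available_slots rest a1
           else (none, a1)) with
    | (some r, a1') => (some r, a1')
    | (none, a1') =>
      -- del assignment[variable]; value = 'not_target'
      let a2 := (a1'.erase var).insert var "not_target"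
      match (if pvIsConsistent available_slots a2 then pvBacktrack available_slots rest a2
             else (none, a2)) with
      | (some r, a2') => (some r, a2')
      | (none, a2') => (none, a2'.erase var)                 -- del; return None

def assign_interceptors_csp_py (threats : List String) (available_slots : Int) : List String :=
  match pvBacktrack available_slots threats PySem.Dict.empty with
  | (some result, _) =>
    if result.size = 0 then []                               -- 'if result:' (dict truthiness)
    else threats.filter (fun threat => result.get? threat == some "target")
  | (none, _) => []

-- ===== PORT B =====
-- loop body of Source B: skip already-seen threats, otherwise record it and target it if a slot is free
def pvStepB (available_slots : Int) (p : PySem.Set String × PySem.Set String) (t : String) :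
    PySem.Set String × PySem.Set String :=
  if PySem.Set.contains p.2 t then p
  else
    let seen' := PySem.Set.add p.2 t
    if ((p.1.length : Int) < available_slots) then (PySem.Set.add p.1 t, seen')
    else (p.1, seen')

def assign_interceptors_csp_py_alt (threats : List String) (available_slots : Int) : List String :=
  let st := threats.foldl (pvStepB available_slots) (PySem.Set.empty, PySem.Set.empty)
  threats.filter (fun t => PySem.Set.contains st.1 t)

-- ===== PRECONDITION & SPEC =====
def Spec_assign_interceptors_csp_py (threats : List String) (available_slots : Int) (out : List String) : Prop := out = assign_interceptors_csp_py_alt threats available_slots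
instance (threats : List String) (available_slots : Int) (out : List String) : Decidable (Spec_assign_interceptors_csp_py threats available_slots out) := by unfold Spec_assign_interceptors_csp_py; infer_instance

-- ===== CLAIM (what is proved, stated in full; the proofs are below) =====
def Claim_equal_assign_interceptors_csp_py : Prop := ∀ (threats : List String) (available_slots : Int), Dom_assign_interceptors_csp_py threats available_slots → Spec_assign_interceptors_csp_py threats available_slots (assign_interceptors_csp_py threats available_slots)

-- ===== LEMMAS AND PROOFS =====

-- dict-erase facts (PySem ships no erase lemmas)
lemma pv_find_filter (k t : String) (l : List (String × String)) (hne : t ≠ k) :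
    List.find? (fun p => p.1 == t) (l.filter (fun p => !(p.1 == k))) =
      List.find? (fun p => p.1 == t) l := by
  induction l with
  | nil => rfl
  | cons p tl ih =>
    by_cases hpk : p.1 = k
    · rw [List.filter_cons, if_neg (by simp [hpk]), ih,
        List.find?_cons_of_neg (by simp [hpk]; exact fun h => hne (h ▸ hpk.symm ▸ rfl))]
    · rw [List.filter_cons, if_pos (by simp [hpk])]
      by_cases hpt : p.1 = t
      · rw [List.find?_cons_of_pos (by simp [hpt]), List.find?_cons_of_pos (by simp [hpt])]
      · rw [List.find?_cons_of_neg (by simp [hpt]), List.find?_cons_of_neg (by simp [hpt]),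
          ih]

lemma pv_get?_erase (d : PySem.Dict String String) (k t : String) :
    (d.erase k).get? t = if t = k then none else d.get? t := by
  rcases d with ⟨l⟩
  by_cases ht : t = k
  · subst ht
    rw [if_pos rfl]
    simp only [PySem.Dict.erase, PySem.Dict.get?]
    rw [List.find?_eq_none.2 (by
      intro x hx
      rw [List.mem_filter] at hx
      simpa using hx.2)]
    rfl
  · rw [if_neg ht]
    simp only [PySem.Dict.erase, PySem.Dict.get?]
    rw [pv_find_filter k t l ht]

lemma pv_mem_keys_erase (d : PySem.Dict String String) (k t : String) :
    t ∈ (d.erase k).keys ↔ t ≠ k ∧ t ∈ d.keys := by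
  rcases d with ⟨l⟩
  simp only [PySem.Dict.erase, PySem.Dict.keys, List.mem_map, List.mem_filter]
  constructor
  · rintro ⟨⟨a, b⟩, ⟨hm, hb⟩, rfl⟩
    simp only [Bool.not_eq_eq_eq_not, Bool.not_true, beq_eq_false_iff_ne, ne_eq] at hb
    exact ⟨hb, ⟨(a, b), hm, rfl⟩⟩
  · rintro ⟨hne, ⟨a, b⟩, hm, rfl⟩
    exact ⟨(a, b), ⟨hm, by simpa using hne⟩, rfl⟩

lemma pv_nodup_keys_erase (d : PySem.Dict String String) (k : String)
    (h : d.keys.Nodup) : (d.erase k).keys.Nodup := by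
  rcases d with ⟨l⟩
  simp only [PySem.Dict.erase, PySem.Dict.keys] at *
  exact List.Nodup.sublist (List.Sublist.map _ List.filter_sublist) h

-- the loop invariant tying A's mutable dict to B's (targets, seen) state
def pvInv (slots : Int) (a : PySem.Dict String String) (targets seen : List String) : Prop :=
  (∀ t, a.get? t = if t ∈ seen then some (if t ∈ targets then "target" else "not_target") else none) ∧
  a.keys.Nodup ∧
  (∀ t, t ∈ a.keys ↔ t ∈ seen) ∧
  targets.Nodup ∧
  (∀ t ∈ targets, t ∈ seen) ∧
  ((∀ t ∈ seen, t ∈ targets) ∨ (targets.length : Int) = slots) ∧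
  ((targets.length : Int) ≤ slots)

-- the value-count A's consistency check recomputes equals |targets|
lemma pv_cnt (a : PySem.Dict String String) (targets seen : List String)
    (hnd : a.keys.Nodup) (htnd : targets.Nodup)
    (h1 : ∀ t, a.get? t = if t ∈ seen then some (if t ∈ targets then "target" else "not_target") else none)
    (hmem : ∀ t, t ∈ a.keys ↔ t ∈ seen)
    (hts : ∀ t ∈ targets, t ∈ seen) :
    (a.values.filter (fun v => v == "target")).length = targets.length := by
  have hv : a.values = a.keys.map (fun k => a.getD k "") := PySem.Dict.values_eq_map_keys a hnd ""
  rw [hv, List.filter_map, List.length_map]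
  have hpt : ∀ k ∈ a.keys,
      ((fun v => v == "target") ∘ (fun k => a.getD k "")) k = decide (k ∈ targets) := by
    intro k hk
    have hks : k ∈ seen := (hmem k).1 hk
    have hgd : a.getD k "" = (if k ∈ targets then "target" else "not_target") := by
      rw [PySem.Dict.getD_eq_get?_getD, h1 k, if_pos hks]
      rfl
    by_cases hkt : k ∈ targets <;> simp [Function.comp, hgd, hkt]
  rw [List.filter_congr hpt]
  have hnd2 : (a.keys.filter (fun k => decide (k ∈ targets))).Nodup := hnd.filter _
  have hmem2 : ∀ x, x ∈ a.keys.filter (fun k => decide (k ∈ targets)) ↔ x ∈ targets := by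
    intro x
    simp only [List.mem_filter, decide_eq_true_eq]
    exact ⟨fun h => h.2, fun h => ⟨(hmem x).2 (hts x h), h⟩⟩
  exact ((List.perm_ext_iff_of_nodup hnd2 htnd).2 hmem2).length_eq

-- model of the dict after assignment[v] = 'target'
lemma pv_model_insert (a : PySem.Dict String String) (targets seen : List String)
    (v : String) (targets1 seen1 : List String)
    (h1 : ∀ t, a.get? t = if t ∈ seen then some (if t ∈ targets then "target" else "not_target") else none)
    (h3 : ∀ t, t ∈ a.keys ↔ t ∈ seen)
    (hs1 : ∀ t, t ∈ seen1 ↔ (t = v ∨ t ∈ seen))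
    (ht1 : ∀ t, t ∈ targets1 ↔ (t = v ∨ t ∈ targets)) :
    (∀ t, (a.insert v "target").get? t =
      if t ∈ seen1 then some (if t ∈ targets1 then "target" else "not_target") else none) ∧
    (∀ t, t ∈ (a.insert v "target").keys ↔ t ∈ seen1) := by
  constructor
  · intro t
    rw [PySem.Dict.get?_insert]
    by_cases htv : t = v
    · subst htv
      rw [if_pos rfl, if_pos ((hs1 t).2 (Or.inl rfl)), if_pos ((ht1 t).2 (Or.inl rfl))]
    · rw [if_neg htv, h1 t]
      by_cases hts : t ∈ seen
      · rw [if_pos hts, if_pos ((hs1 t).2 (Or.inr hts))]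
        by_cases htt : t ∈ targets
        · rw [if_pos htt, if_pos ((ht1 t).2 (Or.inr htt))]
        · rw [if_neg htt, if_neg (fun hc => ((ht1 t).1 hc).elim htv htt)]
      · rw [if_neg hts, if_neg (fun hc => ((hs1 t).1 hc).elim htv hts)]
  · intro t
    rw [PySem.Dict.mem_keys_insert, hs1 t]
    exact or_congr_right (h3 t)

-- model of the dict after del assignment[v]; assignment[v] = 'not_target'
lemma pv_model_fail (a : PySem.Dict String String) (targets seen : List String)
    (v : String) (seen1 : List String)
    (h1 : ∀ t, a.get? t = if t ∈ seen then some (if t ∈ targets then "target" else "not_target") else none)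
    (h2 : a.keys.Nodup)
    (h3 : ∀ t, t ∈ a.keys ↔ t ∈ seen)
    (hvt : v ∉ targets)
    (hs1 : ∀ t, t ∈ seen1 ↔ (t = v ∨ t ∈ seen)) :
    (∀ t, (((a.insert v "target").erase v).insert v "not_target").get? t =
      if t ∈ seen1 then some (if t ∈ targets then "target" else "not_target") else none) ∧
    (∀ t, t ∈ (((a.insert v "target").erase v).insert v "not_target").keys ↔ t ∈ seen1) ∧
    ((((a.insert v "target").erase v).insert v "not_target").keys.Nodup) := by
  refine ⟨?_, ?_, ?_⟩
  · intro t
    rw [PySem.Dict.get?_insert]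
    by_cases htv : t = v
    · subst htv
      rw [if_pos rfl, if_pos ((hs1 t).2 (Or.inl rfl)), if_neg hvt]
    · rw [if_neg htv, pv_get?_erase, if_neg htv, PySem.Dict.get?_insert, if_neg htv, h1 t]
      by_cases hts : t ∈ seen
      · rw [if_pos hts, if_pos ((hs1 t).2 (Or.inr hts))]
      · rw [if_neg hts, if_neg (fun hc => ((hs1 t).1 hc).elim htv hts)]
  · intro t
    rw [PySem.Dict.mem_keys_insert]
    by_cases htv : t = v
    · subst htv
      exact ⟨fun _ => (hs1 t).2 (Or.inl rfl), fun _ => Or.inl rfl⟩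
    · constructor
      · rintro (rfl | hk)
        · exact absurd rfl htv
        · rcases (pv_mem_keys_erase _ _ _).1 hk with ⟨-, hk2⟩
          rcases (PySem.Dict.mem_keys_insert _ _ _ _).1 hk2 with rfl | hk3
          · exact absurd rfl htv
          · exact (hs1 t).2 (Or.inr ((h3 t).1 hk3))
      · intro hts1
        rcases (hs1 t).1 hts1 with rfl | hts
        · exact absurd rfl htv
        · exact Or.inr ((pv_mem_keys_erase _ _ _).2
            ⟨htv, (PySem.Dict.mem_keys_insert _ _ _ _).2 (Or.inr ((h3 t).2 hts))⟩)
  · exact PySem.Dict.nodup_keys_insert _ _ _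
      (pv_nodup_keys_erase _ _ (PySem.Dict.nodup_keys_insert _ _ _ h2))

-- B's seen-set accumulates every processed threat
lemma pv_seen_mono (slots : Int) :
    ∀ (rest : List String) (st : List String × List String) (t : String),
      (t ∈ st.2 ∨ t ∈ rest) → t ∈ (rest.foldl (pvStepB slots) st).2 := by
  intro rest
  induction rest with
  | nil =>
    intro st t h
    rcases h with h | h
    · exact h
    · simp at h
  | cons v rest ih =>
    intro st t h
    have hstep : ∀ s, (s ∈ st.2 ∨ s = v) → s ∈ (pvStepB slots st v).2 := by
      intro s hs
      unfold pvStepB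
      split_ifs with c1 c2
      · rcases hs with hs | rfl
        · exact hs
        · simpa [PySem.Set.contains, List.elem_iff] using c1
      · show s ∈ PySem.Set.add st.2 v
        rcases hs with hs | rfl
        · simp [PySem.Set.add]
          split_ifs <;> simp [hs]
        · simp [PySem.Set.add]
          split_ifs with hc
          · simpa [List.elem_iff] using hc
          · simp
      · show s ∈ PySem.Set.add st.2 v
        rcases hs with hs | rfl
        · simp [PySem.Set.add]
          split_ifs <;> simp [hs]
        · simp [PySem.Set.add]
          split_ifs with hc
          · simpa [List.elem_iff] using hc
          · simp
    rw [List.foldl_cons]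
    rcases h with h | h
    · exact ih _ t (Or.inl (hstep t (Or.inl h)))
    · rcases List.mem_cons.1 h with rfl | h
      · exact ih _ t (Or.inl (hstep t (Or.inr rfl)))
      · exact ih _ t (Or.inr h)

-- with negative slots B never targets anything
lemma pv_neg (slots : Int) (hs : slots < 0) :
    ∀ (rest : List String) (st : List String × List String),
      st.1 = [] → (rest.foldl (pvStepB slots) st).1 = [] := by
  intro rest
  induction rest with
  | nil =>
    intro st h
    exact h
  | cons v rest ih =>
    intro st h
    rw [List.foldl_cons]
    apply ih
    have hlt : ¬ ((st.1.length : Int) < slots) := by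
      rw [h]
      simp
      omega
    by_cases c1 : PySem.Set.contains st.2 v
    · simp only [pvStepB, if_pos c1]
      exact h
    · simp only [pvStepB, if_neg c1, if_neg hlt]
      exact h

-- main induction: from any invariant state, A's backtracking succeeds and lands in the
-- state B's fold computes
lemma pv_bt (slots : Int) (rest : List String) :
    ∀ (a : PySem.Dict String String) (targets seen : List String),
      pvInv slots a targets seen →
      ∃ r, pvBacktrack slots rest a = (some r, r) ∧
        pvInv slots r (rest.foldl (pvStepB slots) (targets, seen)).1
          (rest.foldl (pvStepB slots) (targets, seen)).2 := by
  induction rest with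
  | nil =>
    intro a targets seen h
    exact ⟨a, rfl, h⟩
  | cons v rest ih =>
    intro a targets seen h
    obtain ⟨h1, h2, h3, h4, h5, h6, h7⟩ := h
    by_cases hvt : v ∈ targets
    · -- v already targeted: overwrite with the same value, state unchanged
      have hvseen : v ∈ seen := h5 v hvt
      obtain ⟨hm1, hm2⟩ := pv_model_insert a targets seen v targets seen h1 h3
        (fun t => ⟨Or.inr, fun h => h.elim (fun e => e ▸ hvseen) id⟩)
        (fun t => ⟨Or.inr, fun h => h.elim (fun e => e ▸ hvt) id⟩)
      have hInv1 : pvInv slots (a.insert v "target") targets seen :=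
        ⟨hm1, PySem.Dict.nodup_keys_insert _ _ _ h2, hm2, h4, h5, h6, h7⟩
      have hc1 : pvIsConsistent slots (a.insert v "target") = true := by
        unfold pvIsConsistent
        rw [pv_cnt _ targets seen hInv1.2.1 h4 hm1 hm2 h5]
        exact decide_eq_true h7
      obtain ⟨r, hr, hrI⟩ := ih (a.insert v "target") targets seen hInv1
      refine ⟨r, ?_, ?_⟩
      · simp only [pvBacktrack, hc1, if_true, hr]
      · have hcv : PySem.Set.contains (targets, seen).2 v = true := by
          simpa [PySem.Set.contains, List.elem_iff] using hvseen
        rw [List.foldl_cons]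
        simp only [pvStepB, if_pos hcv]
        exact hrI
    · by_cases hcap : (targets.length : Int) + 1 ≤ slots
      · -- fresh threat, free slot: target it
        have hvseen : v ∉ seen := by
          intro hv
          rcases h6 with h6l | h6r
          · exact hvt (h6l v hv)
          · omega
        have hdisj : targets.Disjoint [v] := by
          intro x hx hxv
          rw [List.mem_singleton] at hxv
          exact hvt (hxv ▸ hx)
        have hndv : (targets ++ [v]).Nodup := h4.append (List.nodup_singleton v) hdisj
        obtain ⟨hm1, hm2⟩ := pv_model_insert a targets seen v (targets ++ [v]) (seen ++ [v])
          h1 h3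
          (fun t => by simp [List.mem_append, or_comm])
          (fun t => by simp [List.mem_append, or_comm])
        have hsub : ∀ t ∈ targets ++ [v], t ∈ seen ++ [v] := by
          intro t ht
          rcases List.mem_append.1 ht with ht | ht
          · exact List.mem_append.2 (Or.inl (h5 t ht))
          · exact List.mem_append.2 (Or.inr ht)
        have hInv1 : pvInv slots (a.insert v "target") (targets ++ [v]) (seen ++ [v]) := by
          refine ⟨hm1, PySem.Dict.nodup_keys_insert _ _ _ h2, hm2, hndv, hsub, ?_, ?_⟩
          · left
            intro t ht
            rcases List.mem_append.1 ht with ht | ht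
            · rcases h6 with h6l | h6r
              · exact List.mem_append.2 (Or.inl (h6l t ht))
              · omega
            · exact List.mem_append.2 (Or.inr ht)
          · simp only [List.length_append, List.length_singleton]
            push_cast
            omega
        have hc1 : pvIsConsistent slots (a.insert v "target") = true := by
          unfold pvIsConsistent
          rw [pv_cnt _ (targets ++ [v]) (seen ++ [v]) hInv1.2.1 hndv hm1 hm2 hsub]
          apply decide_eq_true
          simp only [List.length_append, List.length_singleton]
          push_cast
          omega
        obtain ⟨r, hr, hrI⟩ := ih (a.insert v "target") (targets ++ [v]) (seen ++ [v]) hInv1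
        refine ⟨r, ?_, ?_⟩
        · simp only [pvBacktrack, hc1, if_true, hr]
        · have hcv : ¬ (PySem.Set.contains (targets, seen).2 v = true) := by
            simpa [PySem.Set.contains, List.elem_iff] using hvseen
          have hlt : (targets.length : Int) < slots := by omega
          have haddT : PySem.Set.add (targets, seen).1 v = targets ++ [v] := by
            simp [PySem.Set.add, hvt]
          have haddS : PySem.Set.add (targets, seen).2 v = seen ++ [v] := by
            simp [PySem.Set.add, hvseen]
          rw [List.foldl_cons]
          simp only [pvStepB, if_neg hcv,
            if_pos (show (((targets, seen).1.length : Int) < slots) from hlt), haddT, haddS]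
          exact hrI
      · -- no free slot: 'target' is inconsistent; del, then 'not_target'
        have hLs : (targets.length : Int) = slots := by omega
        have hdisj : targets.Disjoint [v] := by
          intro x hx hxv
          rw [List.mem_singleton] at hxv
          exact hvt (hxv ▸ hx)
        have hndv : (targets ++ [v]).Nodup := h4.append (List.nodup_singleton v) hdisj
        have hs1 : ∀ t, t ∈ (if v ∈ seen then seen else seen ++ [v]) ↔ (t = v ∨ t ∈ seen) := by
          by_cases hv : v ∈ seen
      -- (if-free characterisation of the updated seen set)
          · simp only [if_pos hv]
            exact fun t => ⟨Or.inr, fun h => h.elim (fun e => e ▸ hv) id⟩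
          · simp only [if_neg hv]
            intro t
            simp [List.mem_append, or_comm]
        obtain ⟨hm1, hm2⟩ := pv_model_insert a targets seen v (targets ++ [v])
          (if v ∈ seen then seen else seen ++ [v]) h1 h3 hs1
          (fun t => by simp [List.mem_append, or_comm])
        have hsub1 : ∀ t ∈ targets ++ [v], t ∈ (if v ∈ seen then seen else seen ++ [v]) := by
          intro t ht
          rcases List.mem_append.1 ht with ht | ht
          · exact (hs1 t).2 (Or.inr (h5 t ht))
          · exact (hs1 t).2 (Or.inl (List.mem_singleton.1 ht))
        have hc1 : pvIsConsistent slots (a.insert v "target") = false := by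
          unfold pvIsConsistent
          rw [pv_cnt _ (targets ++ [v]) (if v ∈ seen then seen else seen ++ [v])
            (PySem.Dict.nodup_keys_insert _ _ _ h2) hndv hm1 hm2 hsub1]
          apply decide_eq_false
          simp only [List.length_append, List.length_singleton]
          push_cast
          omega
        obtain ⟨hf1, hf2, hf3⟩ := pv_model_fail a targets seen v
          (if v ∈ seen then seen else seen ++ [v]) h1 h2 h3 hvt hs1
        have hsub2 : ∀ t ∈ targets, t ∈ (if v ∈ seen then seen else seen ++ [v]) :=
          fun t ht => (hs1 t).2 (Or.inr (h5 t ht))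
        have hInv2 : pvInv slots (((a.insert v "target").erase v).insert v "not_target")
            targets (if v ∈ seen then seen else seen ++ [v]) :=
          ⟨hf1, hf3, hf2, h4, hsub2, Or.inr hLs, h7⟩
        have hc2 : pvIsConsistent slots
            (((a.insert v "target").erase v).insert v "not_target") = true := by
          unfold pvIsConsistent
          rw [pv_cnt _ targets (if v ∈ seen then seen else seen ++ [v]) hf3 h4 hf1 hf2 hsub2]
          exact decide_eq_true h7
        obtain ⟨r, hr, hrI⟩ := ih _ targets (if v ∈ seen then seen else seen ++ [v]) hInv2
        refine ⟨r, ?_, ?_⟩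
        · simp only [pvBacktrack, hc1, Bool.false_eq_true, if_false, hc2, if_true, hr]
        · have hst : pvStepB slots (targets, seen) v =
              (targets, if v ∈ seen then seen else seen ++ [v]) := by
            by_cases hv : v ∈ seen
            · have hcv : PySem.Set.contains (targets, seen).2 v = true := by
                simpa [PySem.Set.contains, List.elem_iff] using hv
              simp only [pvStepB, if_pos hcv, if_pos hv]
            · have hcv : ¬ (PySem.Set.contains (targets, seen).2 v = true) := by
                simpa [PySem.Set.contains, List.elem_iff] using hv
              have hlt : ¬ (((targets, seen).1.length : Int) < slots) := by
                show ¬ ((targets.length : Int) < slots)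
                omega
              have haddS : PySem.Set.add (targets, seen).2 v = seen ++ [v] := by
                simp [PySem.Set.add, hv]
              simp only [pvStepB, if_neg hcv, if_neg hlt, haddS, if_neg hv]
          rw [List.foldl_cons, hst]
          exact hrI

lemma pvInv_empty (slots : Int) (h0 : 0 ≤ slots) : pvInv slots PySem.Dict.empty [] [] := by
  refine ⟨?_, ?_, ?_, List.nodup_nil, ?_, Or.inl ?_, by simpa using h0⟩
  · intro t
    simp [PySem.Dict.get?_empty]
  · simp [PySem.Dict.keys_empty]
  · intro t
    simp [PySem.Dict.keys_empty]
  · intro t ht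
    simp at ht
  · intro t ht
    simp at ht

-- ===== VERDICT (by name: the statement is the Claim_ definition above) =====
theorem assign_interceptors_csp_py_spec : Claim_equal_assign_interceptors_csp_py := by
  intro threats slots _hDom
  unfold Spec_assign_interceptors_csp_py
  by_cases h0 : 0 ≤ slots
  · obtain ⟨r, hr, hrI⟩ := pv_bt slots threats PySem.Dict.empty [] [] (pvInv_empty slots h0)
    obtain ⟨hI1, hI2, hI3, hI4, hI5, hI6, hI7⟩ := hrI
    cases threats with
    | nil => rfl
    | cons v tl =>
      have hvS : v ∈ ((v :: tl).foldl (pvStepB slots) ([], [])).2 :=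
        pv_seen_mono slots (v :: tl) ([], []) v (Or.inr (List.mem_cons_self ..))
      have hvK : v ∈ r.keys := (hI3 v).2 hvS
      have hsz : ¬ r.size = 0 := by
        intro hlen
        have hkl : r.keys.length = 0 := by
          rcases r with ⟨l⟩
          simpa [PySem.Dict.keys, PySem.Dict.size] using hlen
        rw [List.length_eq_zero_iff] at hkl
        rw [hkl] at hvK
        simp at hvK
      simp only [assign_interceptors_csp_py, assign_interceptors_csp_py_alt, PySem.Set.empty, hr,
        if_neg hsz]
      apply List.filter_congr
      intro t ht
      have htS : t ∈ ((v :: tl).foldl (pvStepB slots) ([], [])).2 :=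
        pv_seen_mono slots (v :: tl) ([], []) t (Or.inr ht)
      rw [hI1 t, if_pos htS]
      split_ifs with hx <;> rw [List.foldl_cons] at hx <;> simp [hx]
  · have h0' : slots < 0 := by omega
    cases threats with
    | nil => rfl
    | cons v tl =>
      have hc1 : pvIsConsistent slots (PySem.Dict.empty.insert v "target") = false := by
        apply decide_eq_false
        simp [PySem.Dict.insert, PySem.Dict.empty, PySem.Dict.contains, PySem.Dict.values,
          List.filter]
        omega
      have hc2 : pvIsConsistent slots
          (((PySem.Dict.empty.insert v "target").erase v).insert v "not_target") = false := by
        apply decide_eq_false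
        simp [PySem.Dict.insert, PySem.Dict.erase, PySem.Dict.empty, PySem.Dict.contains,
          PySem.Dict.values, List.filter]
        omega
      have hT : ((v :: tl).foldl (pvStepB slots) ([], [])).1 = [] :=
        pv_neg slots h0' (v :: tl) ([], []) rfl
      simp only [assign_interceptors_csp_py, assign_interceptors_csp_py_alt, PySem.Set.empty,
        pvBacktrack, hc1, Bool.false_eq_true, if_false, hc2]
      rw [hT]
      simp [PySem.Set.contains]
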